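-- pv_equiv track=rewrite | github.com/Kaens/format-re-tools | findsigs.py | DIESig
-- ===== SOURCE A (Python) =====
-- ansimin = 2 # how many characters an ansi sequence should have for the 'text' conversion to happen in the DiE sig
--
-- def DIESig(bs):
-- 	# creates a Detect-It-Easy signature from bytes
-- 	s = '"'; s1 = ""
-- 	for b in bs:
-- 		if (0x20 <= b < 0x7F) and not (chr(b) in ["'",'"']): # if it's an ansi character (but not a quote or apostrophe)
-- 			s1 += chr(b) # add it to the buffer for 'text' representation
-- 		else: # not an ansi character...
-- 			if len(s1) >= ansimin: # if the size of the 'text' repr collected so far is above threshold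
-- 				s += "'"+s1+"'" # add it to the sig
-- 			elif s1 != "":
-- 				for q in s1:
-- 					s += f"{ord(q):02X}"
-- 			s1 = ""; s += f"{b:02X}" # empty the 'text' buffer and add the current hex as hex
-- 	if len(s1) >= ansimin: # the end of the sig has the same effect for 'text' repr. Feels like this can be optimised...
-- 		s += "'"+s1+"'"
-- 	elif len(s1) > 0: # if our 'text' repr has characters but is below threshold, empty it out as hexes
-- 		for q in s1:
-- 			s += f"{ord(q):02X}"
-- 	del s1; s = s.replace("''",""); s += '"'
-- 	return s
-- ===== SOURCE B (Python) =====
-- from itertools import groupby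
--
-- ansimin = 2
--
-- def _isansi(b):
--     return 0x20 <= b < 0x7F and chr(b) not in ("'", '"')
--
-- def DIESig(bs):
--     parts = []
--     for key, grp in groupby(bs, key=_isansi):
--         run = list(grp)
--         if key:
--             text = ''.join(map(chr, run))
--             if len(text) >= ansimin:
--                 parts.append("'" + text + "'")
--             else:
--                 parts.extend(f'{c:02X}' for c in run)
--         else:
--             parts.extend(f'{b:02X}' for b in run)
--     return ('"' + ''.join(parts)).replace("''", "") + '"'
-- ===== Notes on version B (the rewrite author's own statement) =====
-- stated objective: alternative
-- what changed: B partitions the bytes into maximal runs with itertools.groupby on the printable-ASCII predicate and encodes each run wholesale (quoted text or per-byte hex) into a joined list of parts, instead of A's single pass that grows two string accumulators and flushes a buffer inside the loop.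
import Mathlib
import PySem

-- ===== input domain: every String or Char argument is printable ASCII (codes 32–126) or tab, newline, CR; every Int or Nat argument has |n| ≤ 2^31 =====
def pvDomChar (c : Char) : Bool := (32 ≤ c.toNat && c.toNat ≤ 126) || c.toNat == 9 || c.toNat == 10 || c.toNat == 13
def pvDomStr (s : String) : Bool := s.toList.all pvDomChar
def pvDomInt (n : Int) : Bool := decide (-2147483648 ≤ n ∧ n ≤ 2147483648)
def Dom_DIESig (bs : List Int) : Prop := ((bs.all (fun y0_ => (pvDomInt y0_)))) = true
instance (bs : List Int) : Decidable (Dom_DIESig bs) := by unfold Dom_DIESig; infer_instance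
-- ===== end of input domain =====

-- B replaces A's one-pass loop with two string accumulators by a groupby-style
-- partition of the bytes into maximal runs, each run encoded wholesale; same cost,
-- alternative decomposition. Equivalence proved for the return value on all inputs.

-- shared helpers: the predicate `0x20 <= b < 0x7F and chr(b) not in ("'",'"')`
-- and the f-string `f"{b:02X}"`, which both Pythons use verbatim
def pvAnsi (b : Int) : Bool := (32 ≤ b && b < 127) && !(b == 39 || b == 34)

def pvHexDigit (n : Nat) : Char :=
  ['0','1','2','3','4','5','6','7','8','9','A','B','C','D','E','F'].getD n '0'

-- uppercase hex digits of n, no leading zeros ("0" for 0)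
def pvNatHex (n : Nat) : List Char :=
  if h : n < 16 then [pvHexDigit n]
  else pvNatHex (n / 16) ++ [pvHexDigit (n % 16)]
decreasing_by exact Nat.div_lt_self (by omega) (by omega)

-- f"{b:02X}" : CPython pads the digits (sign included) to width 2 with '0'
def pyHex2 (b : Int) : List Char :=
  if b < 0 then '-' :: pvNatHex (-b).toNat
  else
    let d := pvNatHex b.toNat
    if d.length < 2 then '0' :: d else d

-- ===== PORT A =====
-- loop body of A's `for b in bs:` (state = (s, s1), both strings as List Char)
def pvStepA (acc : List Char × List Char) (b : Int) : List Char × List Char :=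
  let s := acc.1
  let s1 := acc.2
  if pvAnsi b then (s, s1 ++ [Char.ofNat b.toNat])
  else
    let s :=
      if 2 ≤ s1.length then s ++ '\'' :: s1 ++ ['\'']
      else if s1 ≠ [] then s1.foldl (fun t q => t ++ pyHex2 (q.toNat : Int)) s
      else s
    (s ++ pyHex2 b, [])

-- A's code after the loop, up to (not including) the replace
def pvFinA (acc : List Char × List Char) : List Char :=
  if 2 ≤ acc.2.length then acc.1 ++ '\'' :: acc.2 ++ ['\'']
  else if 0 < acc.2.length then acc.2.foldl (fun t q => t ++ pyHex2 (q.toNat : Int)) acc.1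
  else acc.1

def DIESig (bs : List Int) : String :=
  String.ofList
    (PySem.Chars.replace (pvFinA (bs.foldl pvStepA (['"'], []))) ['\'', '\''] [] ++ ['"'])

-- ===== PORT B =====
-- itertools.groupby over bs keyed by pvAnsi: list of (key, maximal run)
def pvRuns : List Int → List (Bool × List Int)
  | [] => []
  | b :: rest =>
    let k := pvAnsi b
    (k, b :: rest.takeWhile (fun x => pvAnsi x == k)) ::
      pvRuns (rest.dropWhile (fun x => pvAnsi x == k))
termination_by bs => bs.length
decreasing_by
  simpa using Nat.lt_succ_of_le (List.length_dropWhile_le _ _)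

-- the parts contributed by one (key, run) group in B's loop
def pvEncRun (r : Bool × List Int) : List Char :=
  if r.1 then
    let text := r.2.map (fun b => Char.ofNat b.toNat)
    if 2 ≤ text.length then '\'' :: text ++ ['\'']
    else (r.2.map pyHex2).flatten
  else (r.2.map pyHex2).flatten

def DIESig_alt (bs : List Int) : String :=
  let parts := (pvRuns bs).map pvEncRun
  String.ofList
    (PySem.Chars.replace ('"' :: parts.flatten) ['\'', '\''] [] ++ ['"'])

-- ===== PRECONDITION & SPEC =====
def Spec_DIESig (bs : List Int) (out : String) : Prop := out = DIESig_alt bs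
instance (bs : List Int) (out : String) : Decidable (Spec_DIESig bs out) := by unfold Spec_DIESig; infer_instance

-- ===== CLAIM (what is proved, stated in full; the proofs are below) =====
def Claim_equal_DIESig : Prop := ∀ (bs : List Int), Dom_DIESig bs → Spec_DIESig bs (DIESig bs)

-- ===== LEMMAS AND PROOFS =====

-- what flushing the buffer s1 appends (quoted text above threshold, else hexes)
def pvFlush (s1 : List Char) : List Char :=
  if 2 ≤ s1.length then '\'' :: s1 ++ ['\'']
  else (s1.map (fun q => pyHex2 (q.toNat : Int))).flatten

-- A's loop rewritten as direct recursion: the suffix appended after prefix s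
def pvArest (s1 : List Char) : List Int → List Char
  | [] => pvFlush s1
  | b :: bs =>
    if pvAnsi b then pvArest (s1 ++ [Char.ofNat b.toNat]) bs
    else pvFlush s1 ++ pyHex2 b ++ pvArest [] bs

def pvJoinRuns (rs : List (Bool × List Int)) : List Char := (rs.map pvEncRun).flatten

theorem pvHexfold (l : List Char) (s : List Char) :
    l.foldl (fun t q => t ++ pyHex2 (q.toNat : Int)) s
      = s ++ (l.map (fun q => pyHex2 (q.toNat : Int))).flatten := by
  induction l generalizing s with
  | nil => simp
  | cons c cs ih => simp [ih]

theorem pvFlushLoop_eq (s s1 : List Char) :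
    (if 2 ≤ s1.length then s ++ '\'' :: s1 ++ ['\'']
     else if s1 ≠ [] then s1.foldl (fun t q => t ++ pyHex2 (q.toNat : Int)) s
     else s) = s ++ pvFlush s1 := by
  unfold pvFlush
  split_ifs with h1 h2
  · simp
  · exact pvHexfold s1 s
  · simp at h2; simp [h2]

theorem pvFinA_eq (s s1 : List Char) : pvFinA (s, s1) = s ++ pvFlush s1 := by
  unfold pvFinA pvFlush
  split_ifs with h1 h2
  · simp
  · exact pvHexfold s1 s
  · have : s1 = [] := by
      cases s1 with
      | nil => rfl
      | cons a l => simp at h2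
    simp [this]

theorem pvFoldA (bs : List Int) : ∀ (s s1 : List Char),
    pvFinA (bs.foldl pvStepA (s, s1)) = s ++ pvArest s1 bs := by
  induction bs with
  | nil => intro s s1; simpa [pvArest] using pvFinA_eq s s1
  | cons b bs ih =>
    intro s s1
    by_cases hb : pvAnsi b
    · simp [pvStepA, hb, pvArest, ih]
    · simp only [List.foldl_cons, pvStepA, hb, if_neg, Bool.false_eq_true, if_false]
      rw [ih, pvArest, if_neg hb, pvFlushLoop_eq]
      simp

-- the Char.ofNat roundtrip for ansi bytes
theorem pvHexChar (b : Int) (hb : pvAnsi b = true) :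
    pyHex2 (((Char.ofNat b.toNat).toNat : Nat) : Int) = pyHex2 b := by
  have h1 : 32 ≤ b ∧ b < 127 := by
    unfold pvAnsi at hb
    constructor <;> [skip; skip] <;> simp at hb <;> omega
  obtain ⟨ha, hc⟩ := h1
  have hv : b.toNat.isValidChar := by
    unfold Nat.isValidChar
    exact Or.inl (by omega)
  have : (Char.ofNat b.toNat).toNat = b.toNat := by simp [Char.ofNat, hv]
  rw [this]
  congr 1
  omega

theorem pvFlush_map (run : List Int) (h : ∀ x ∈ run, pvAnsi x = true) :
    pvFlush (run.map (fun b => Char.ofNat b.toNat)) = pvEncRun (true, run) := by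
  unfold pvFlush pvEncRun
  simp only [List.length_map, List.map_map]
  have : run.map ((fun q => pyHex2 (q.toNat : Int)) ∘ fun b => Char.ofNat b.toNat)
       = run.map pyHex2 := by
    apply List.map_congr_left
    intro x hx
    exact pvHexChar x (h x hx)
  simp [this]

theorem pvTakeWhile_all {α : Type} (l : List α) (p : α → Bool) (h : ∀ x ∈ l, p x = true) :
    l.takeWhile p = l :=
  List.takeWhile_eq_self_iff.mpr (by simpa using h)

theorem pvDropWhile_all {α : Type} (l : List α) (p : α → Bool) (h : ∀ x ∈ l, p x = true) :
    l.dropWhile p = [] :=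
  List.dropWhile_eq_nil_iff.mpr (by simpa using h)

theorem pvTakeWhile_append {α : Type} (l rest : List α) (p : α → Bool)
    (h : ∀ x ∈ l, p x = true) : (l ++ rest).takeWhile p = l ++ rest.takeWhile p := by
  induction l with
  | nil => simp
  | cons a t ih =>
    simp only [List.cons_append, List.takeWhile_cons, h a (by simp)]
    simp [ih (fun x hx => h x (by simp [hx]))]

theorem pvDropWhile_append {α : Type} (l rest : List α) (p : α → Bool)
    (h : ∀ x ∈ l, p x = true) : (l ++ rest).dropWhile p = rest.dropWhile p := by
  induction l with
  | nil => simp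
  | cons a t ih =>
    simp only [List.cons_append, List.dropWhile_cons, h a (by simp)]
    simp [ih (fun x hx => h x (by simp [hx]))]

-- a non-ansi byte contributes its own hex, whatever run it lands in
theorem pvRuns_hex (b : Int) (hb : pvAnsi b = false) (bs : List Int) :
    pvJoinRuns (pvRuns (b :: bs)) = pyHex2 b ++ pvJoinRuns (pvRuns bs) := by
  cases bs with
  | nil => simp [pvRuns, pvJoinRuns, pvEncRun, hb]
  | cons c cs =>
    by_cases hc : pvAnsi c
    · rw [pvRuns]
      simp only [hb]
      have ht : (c :: cs).takeWhile (fun x => pvAnsi x == false) = [] := by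
        simp [List.takeWhile_cons, hc]
      have hd : (c :: cs).dropWhile (fun x => pvAnsi x == false) = c :: cs := by
        simp [List.dropWhile_cons, hc]
      rw [ht, hd]
      simp [pvJoinRuns, pvEncRun, hb]
    · have hc' : pvAnsi c = false := by simpa using hc
      rw [pvRuns]
      simp only [hb]
      conv_rhs => rw [pvRuns]
      simp only [hc']
      simp [List.takeWhile_cons, List.dropWhile_cons, hc', pvJoinRuns, pvEncRun, hb]

theorem pvMain (bs : List Int) : ∀ (pre : List Int), (∀ x ∈ pre, pvAnsi x = true) →
    pvArest (pre.map (fun b => Char.ofNat b.toNat)) bs = pvJoinRuns (pvRuns (pre ++ bs)) := by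
  induction bs with
  | nil =>
    intro pre hpre
    rw [pvArest]
    cases pre with
    | nil => simp [pvRuns, pvJoinRuns, pvFlush]
    | cons p ps =>
      simp only [List.append_nil]
      rw [pvRuns]
      have hp : pvAnsi p = true := hpre p (by simp)
      simp only [hp]
      rw [pvTakeWhile_all ps _ (by intro x hx; simp [hpre x (by simp [hx])]),
          pvDropWhile_all ps _ (by intro x hx; simp [hpre x (by simp [hx])])]
      rw [pvRuns]
      simpa [pvJoinRuns] using pvFlush_map (p :: ps) hpre
  | cons b bs ih =>
    intro pre hpre
    by_cases hb : pvAnsi b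
    · rw [pvArest, if_pos hb]
      have := ih (pre ++ [b]) (by
        intro x hx
        rcases List.mem_append.mp hx with h | h
        · exact hpre x h
        · simp at h; simpa [h] using hb)
      simpa using this
    · have hb' : pvAnsi b = false := by simpa using hb
      rw [pvArest, if_neg hb]
      have h0 := ih [] (by simp)
      simp only [List.map_nil, List.nil_append] at h0
      rw [h0]
      cases pre with
      | nil => simp [pvRuns_hex b hb' bs, pvFlush]
      | cons p ps =>
        have hall : ∀ x ∈ p :: ps, pvAnsi x = true := hpre
        rw [show (p :: ps) ++ b :: bs = p :: (ps ++ b :: bs) by simp]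
        rw [pvRuns]
        have hp : pvAnsi p = true := hall p (by simp)
        simp only [hp]
        rw [pvTakeWhile_append ps (b :: bs) _ (by intro x hx; simp [hall x (by simp [hx])]),
            pvDropWhile_append ps (b :: bs) _ (by intro x hx; simp [hall x (by simp [hx])])]
        have htb : (b :: bs).takeWhile (fun x => pvAnsi x == true) = [] := by
          simp [List.takeWhile_cons, hb']
        have hdb : (b :: bs).dropWhile (fun x => pvAnsi x == true) = b :: bs := by
          simp [List.dropWhile_cons, hb']
        rw [htb, hdb]
        have : pvJoinRuns ((true, p :: ps) :: pvRuns (b :: bs))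
             = pvEncRun (true, p :: ps) ++ pvJoinRuns (pvRuns (b :: bs)) := by
          simp [pvJoinRuns]
        rw [List.append_nil, this, pvRuns_hex b hb' bs]
        rw [← pvFlush_map (p :: ps) hall]
        simp

-- ===== VERDICT (by name: the statement is the Claim_ definition above) =====
theorem DIESig_spec : Claim_equal_DIESig := by
  intro bs _
  unfold Spec_DIESig DIESig DIESig_alt
  have h1 := pvFoldA bs ['"'] []
  have h2 := pvMain bs [] (by simp)
  simp only [List.map_nil, List.nil_append] at h2
  rw [h1, h2]
  rfl
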